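-- pv_equiv track=rewrite | github.com/hiroshi50478/algos | algorithms/graphs/graph_drawing.py | is_oriented
-- ===== SOURCE A (Python) =====
-- arr = [
--     [],
--     [5],
--     [9],
--     [1],
--     [2, 9],
--     [3],
--     [8, 11],
--     [4, 5],
--     [9, 10, 11],
--     [5, 7],
--     [2, 6],
--     [3],
-- ]
--
-- def is_oriented(arr=arr):
--     temp = []
--     for i in range(len(arr)):
--         for j in arr[i]:
--             for l in range(len(temp)):
--                 if temp[l] == [j, i]:
--                     temp.pop(l)
--                     break
--             else:
--                 temp.append([i, j])
--
--     if len(temp) > 0: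
--         return True
--     return False
-- ===== SOURCE B (Python) =====
-- arr = [
--     [],
--     [5],
--     [9],
--     [1],
--     [2, 9],
--     [3],
--     [8, 11],
--     [4, 5],
--     [9, 10, 11],
--     [5, 7],
--     [2, 6],
--     [3],
-- ]
--
-- def is_oriented(arr=arr):
--     # The pair-matching residue is nonempty iff the edge multiset is asymmetric:
--     # some count(i,j) != count(j,i), or some self-loop occurs an odd number of times.
--     cnt = {}
--     for i, nbrs in enumerate(arr):
--         for j in nbrs:
--             cnt[(i, j)] = cnt.get((i, j), 0) + 1
--     for (i, j), c in cnt.items():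
--         if i == j:
--             if c % 2 == 1:
--                 return True
--         elif c != cnt.get((j, i), 0):
--             return True
--     return False
-- ===== Notes on version B (the rewrite author's own statement) =====
-- stated objective: faster
-- what changed: Replaces A's online cancellation against a pending-edge list (quadratic inner scan) by a structural characterization: count all edges once into a dict, then check multiset symmetry - some count(i,j) != count(j,i), or an odd self-loop count.
import Mathlib
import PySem

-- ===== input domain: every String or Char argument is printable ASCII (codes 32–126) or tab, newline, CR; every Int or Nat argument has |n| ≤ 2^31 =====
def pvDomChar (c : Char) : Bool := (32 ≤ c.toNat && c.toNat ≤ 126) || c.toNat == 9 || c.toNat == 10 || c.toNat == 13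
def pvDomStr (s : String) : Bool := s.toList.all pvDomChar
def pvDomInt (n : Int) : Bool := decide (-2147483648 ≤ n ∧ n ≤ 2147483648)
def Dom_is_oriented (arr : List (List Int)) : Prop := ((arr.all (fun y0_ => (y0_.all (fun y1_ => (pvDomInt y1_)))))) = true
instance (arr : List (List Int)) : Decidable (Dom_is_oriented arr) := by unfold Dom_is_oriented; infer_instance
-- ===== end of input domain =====

-- B drops A's online cancellation against a pending-edge list entirely: it counts all
-- edges once into a dict and checks the multiset for symmetry (objective: faster).

-- ===== PORT A =====
-- the inner 'for l in range(len(temp)): if temp[l] == [j, i]: temp.pop(l); break'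
-- with its for-else: some = temp after popping the first match, none = no match (append follows)
def scanPop (temp : List (List Int)) (t : List Int) : Option (List (List Int)) :=
  match temp with
  | [] => none
  | x :: xs => if x = t then some xs else (scanPop xs t).map (x :: ·)

def stepA (temp : List (List Int)) (i j : Int) : List (List Int) :=
  match scanPop temp [j, i] with
  | some t => t
  | none => temp ++ [[i, j]]

def is_oriented (arr : List (List Int)) : Bool :=
  let temp := (PySem.List.pyRange 0 arr.length 1).foldl
      (fun temp i => (PySem.List.pyGetD arr i []).foldl (fun temp j => stepA temp i j) temp) []
  decide (0 < temp.length)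

-- ===== PORT B =====
def is_oriented_alt (arr : List (List Int)) : Bool :=
  let cnt := (PySem.List.enumerate arr).foldl
      (fun cnt pr => pr.2.foldl
        (fun (cnt : PySem.Dict (Int × Int) Int) j =>
          cnt.insert (pr.1, j) (cnt.getD (pr.1, j) 0 + 1)) cnt) PySem.Dict.empty
  cnt.items.any (fun pr =>
    if pr.1.1 = pr.1.2 then PySem.Int.mod pr.2 2 == 1
    else decide (pr.2 ≠ cnt.getD (pr.1.2, pr.1.1) 0))

-- ===== PRECONDITION & SPEC =====
def Spec_is_oriented (arr : List (List Int)) (out : Bool) : Prop := out = is_oriented_alt arr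
instance (arr : List (List Int)) (out : Bool) : Decidable (Spec_is_oriented arr out) := by unfold Spec_is_oriented; infer_instance

-- ===== CLAIM (what is proved, stated in full; the proofs are below) =====
def Claim_equal_is_oriented : Prop := ∀ (arr : List (List Int)), Dom_is_oriented arr → Spec_is_oriented arr (is_oriented arr)

-- ===== LEMMAS AND PROOFS =====

-- the edge list both nested loops traverse
def edgesOf (arr : List (List Int)) : List (Int × Int) :=
  (PySem.List.enumerate arr).flatMap (fun pr => pr.2.map (fun j => (pr.1, j)))

-- a nested fold over (index, neighbours) pairs is the fold over the flattened edge list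
lemma foldl_pairs {σ : Type} (f : σ → Int → Int → σ) :
    ∀ (L : List (Int × List Int)) (init : σ),
    L.foldl (fun s pr => pr.2.foldl (fun s j => f s pr.1 j) s) init
      = (L.flatMap (fun pr => pr.2.map (fun j => (pr.1, j)))).foldl (fun s e => f s e.1 e.2) init := by
  intro L
  induction L with
  | nil => intro init; simp
  | cons pr L ih =>
    intro init
    simp [List.foldl_append, List.foldl_map, ih]

-- 'for i in range(len(arr)): … arr[i] …' is a fold over enumerate(arr)
lemma foldl_range_enumerate {σ : Type} (g : σ → Int → List Int → σ) :
    ∀ (arr : List (List Int)) (s : Int) (init : σ),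
    (List.range arr.length).foldl (fun st (k : Nat) => g st (s + (k : Int)) (arr.getD k [])) init
      = (PySem.List.enumerate arr s).foldl (fun st p => g st p.1 p.2) init := by
  intro arr
  induction arr with
  | nil => intro s init; simp [PySem.List.enumerate]
  | cons x xs ih =>
    intro s init
    rw [PySem.List.enumerate_cons, List.foldl_cons]
    rw [List.length_cons, List.range_succ_eq_map, List.foldl_cons, List.foldl_map]
    have hfun : (fun (st : σ) (k : Nat) => g st (s + ((k.succ : Nat) : Int)) ((x :: xs).getD k.succ []))
        = (fun st (k : Nat) => g st ((s + 1) + (k : Int)) (xs.getD k [])) := by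
      funext st k
      congr 1
      · push_cast; ring
    simp only [Nat.cast_zero, add_zero, List.getD_cons_zero]
    rw [hfun, ih (s + 1)]

lemma pyfold_enumerate {σ : Type} (g : σ → Int → List Int → σ) (arr : List (List Int)) (init : σ) :
    (PySem.List.pyRange 0 arr.length 1).foldl (fun st i => g st i (PySem.List.pyGetD arr i [])) init
      = (PySem.List.enumerate arr 0).foldl (fun st p => g st p.1 p.2) init := by
  rw [PySem.List.pyRange_one, List.foldl_map]
  have hfun : (fun (st : σ) (k : Nat) => g st ((0 : Int) + (k : Int)) (PySem.List.pyGetD arr ((0 : Int) + (k : Int)) []))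
      = (fun st (k : Nat) => g st ((0 : Int) + (k : Int)) (arr.getD k [])) := by
    funext st k
    congr 1
    rw [zero_add, PySem.List.pyGetD_natCast]
  have := foldl_range_enumerate g arr 0 init
  simp only [Int.sub_zero, Int.toNat_natCast] at *
  rw [hfun]
  exact this

-- A's inner scan pops the first occurrence, i.e. it is List.erase when the target is present
lemma scanPop_eq (temp : List (List Int)) (t : List Int) :
    scanPop temp t = if t ∈ temp then some (temp.erase t) else none := by
  induction temp with
  | nil => simp [scanPop]
  | cons x xs ih =>
    by_cases hx : x = t
    · subst hx; simp [scanPop]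
    · simp only [scanPop, if_neg hx, ih, List.erase_cons, List.mem_cons]
      have : ¬ t = x := fun h => hx h.symm
      simp [this]
      split_ifs with hm <;> simp

-- invariant: A's pending list holds exactly the asymmetry residue of the edges seen so far
def InvAB (es : List (Int × Int)) (temp : List (List Int)) : Prop :=
  (∀ a b : Int, a ≠ b → temp.count [a, b] = es.count (a, b) - es.count (b, a)) ∧
  (∀ a : Int, temp.count [a, a] = es.count (a, a) % 2) ∧
  (∀ x ∈ temp, ∃ a b : Int, x = [a, b])

lemma count_append_one {A : Type} [BEq A] [LawfulBEq A] [DecidableEq A] (xs : List A) (p e : A) :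
    (xs ++ [e]).count p = xs.count p + if p = e then 1 else 0 := by
  by_cases h : p = e
  · subst h; simp [List.count_append]
  · have h' : ¬ (e = p) := fun q => h q.symm
    simp [List.count_append, h, h']

lemma count_erase_one {A : Type} [BEq A] [LawfulBEq A] [DecidableEq A] (xs : List A) (t p : A) :
    (xs.erase t).count p = xs.count p - if t = p then 1 else 0 := by
  rw [List.count_erase]
  by_cases h : t = p
  · simp [h]
  · simp [h]

lemma step_inv (es : List (Int × Int)) (temp : List (List Int)) (i j : Int)
    (h : InvAB es temp) : InvAB (es ++ [(i, j)]) (stepA temp i j) := by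
  obtain ⟨h1, h2, h3⟩ := h
  unfold stepA
  rw [scanPop_eq]
  by_cases hm : ([j, i] : List Int) ∈ temp
  · -- a reverse partner is pending: A pops its first occurrence
    simp only [if_pos hm]
    have hpos : 0 < temp.count [j, i] := List.count_pos_iff.2 hm
    refine ⟨?_, ?_, fun x hx => h3 x (List.mem_of_mem_erase hx)⟩
    · intro a b hab
      have Hab := h1 a b hab
      have Hba := h1 b a (Ne.symm hab)
      rw [count_erase_one, count_append_one, count_append_one]
      by_cases hij : i = j
      · subst hij
        have Hii := h2 i
        (try simp only [Prod.mk.injEq, List.cons.injEq, and_true, and_self]); first | (split_ifs <;> omega) | omega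
      · have Hji := h1 j i (fun h' => hij h'.symm)
        have Hij := h1 i j hij
        by_cases hA : a = i ∧ b = j
        · obtain ⟨rfl, rfl⟩ := hA
          (try simp only [Prod.mk.injEq, List.cons.injEq, and_true, and_self]); first | (split_ifs <;> omega) | omega
        · by_cases hB : a = j ∧ b = i
          · obtain ⟨rfl, rfl⟩ := hB
            (try simp only [Prod.mk.injEq, List.cons.injEq, and_true, and_self]); first | (split_ifs <;> omega) | omega
          · (try simp only [Prod.mk.injEq, List.cons.injEq, and_true, and_self]); first | (split_ifs <;> omega) | omega
    · intro a
      have Ha := h2 a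
      rw [count_erase_one, count_append_one]
      by_cases hij : i = j
      · subst hij
        have Hii := h2 i
        by_cases ha : a = i
        · subst ha
          (try simp only [Prod.mk.injEq, List.cons.injEq, and_true, and_self]); first | (split_ifs <;> omega) | omega
        · (try simp only [Prod.mk.injEq, List.cons.injEq, and_true, and_self]); first | (split_ifs <;> omega) | omega
      · have Hji := h1 j i (fun h' => hij h'.symm)
        (try simp only [Prod.mk.injEq, List.cons.injEq, and_true, and_self]); first | (split_ifs <;> omega) | omega
  · -- no reverse partner: A appends [i, j]
    simp only [if_neg hm]
    have hz : temp.count [j, i] = 0 := List.count_eq_zero.2 hm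
    refine ⟨?_, ?_, ?_⟩
    · intro a b hab
      have Hab := h1 a b hab
      have Hba := h1 b a (Ne.symm hab)
      rw [count_append_one, count_append_one, count_append_one]
      by_cases hij : i = j
      · subst hij
        have Hii := h2 i
        (try simp only [Prod.mk.injEq, List.cons.injEq, and_true, and_self]); first | (split_ifs <;> omega) | omega
      · have Hji := h1 j i (fun h' => hij h'.symm)
        have Hij := h1 i j hij
        by_cases hA : a = i ∧ b = j
        · obtain ⟨rfl, rfl⟩ := hA
          (try simp only [Prod.mk.injEq, List.cons.injEq, and_true, and_self]); first | (split_ifs <;> omega) | omega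
        · by_cases hB : a = j ∧ b = i
          · obtain ⟨rfl, rfl⟩ := hB
            (try simp only [Prod.mk.injEq, List.cons.injEq, and_true, and_self]); first | (split_ifs <;> omega) | omega
          · (try simp only [Prod.mk.injEq, List.cons.injEq, and_true, and_self]); first | (split_ifs <;> omega) | omega
    · intro a
      have Ha := h2 a
      rw [count_append_one, count_append_one]
      by_cases hij : i = j
      · subst hij
        have Hii := h2 i
        by_cases ha : a = i
        · subst ha
          (try simp only [Prod.mk.injEq, List.cons.injEq, and_true, and_self]); first | (split_ifs <;> omega) | omega
        · (try simp only [Prod.mk.injEq, List.cons.injEq, and_true, and_self]); first | (split_ifs <;> omega) | omega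
      · have Hji := h1 j i (fun h' => hij h'.symm)
        (try simp only [Prod.mk.injEq, List.cons.injEq, and_true, and_self]); first | (split_ifs <;> omega) | omega
    · intro x hx
      rcases List.mem_append.1 hx with hx | hx
      · exact h3 x hx
      · exact ⟨i, j, by simpa using hx⟩

lemma fold_inv : ∀ (es2 es1 : List (Int × Int)) (temp : List (List Int)), InvAB es1 temp →
    InvAB (es1 ++ es2) (es2.foldl (fun t e => stepA t e.1 e.2) temp) := by
  intro es2
  induction es2 with
  | nil => intro es1 temp h; simpa using h
  | cons e es ih =>
    intro es1 temp h
    have := ih (es1 ++ [e]) _ (step_inv es1 temp e.1 e.2 h)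
    simpa [List.append_assoc] using this

lemma final_iff (es : List (Int × Int)) (temp : List (List Int)) (h : InvAB es temp) :
    decide (0 < temp.length)
      = (PySem.Dict.counter es).items.any (fun pr =>
          if pr.1.1 = pr.1.2 then PySem.Int.mod pr.2 2 == 1
          else decide (pr.2 ≠ (PySem.Dict.counter es).getD (pr.1.2, pr.1.1) 0)) := by
  obtain ⟨h1, h2, h3⟩ := h
  rw [PySem.Dict.items_counter, List.any_map, Bool.eq_iff_iff, decide_eq_true_eq, List.any_eq_true]
  simp only [Function.comp, PySem.Dict.getD_counter, PySem.Set.mem_ofList]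
  constructor
  · intro hlen
    obtain ⟨x, hx⟩ : ∃ x, x ∈ temp := by
      cases temp with
      | nil => simp at hlen
      | cons y ys => exact ⟨y, List.mem_cons_self⟩
    obtain ⟨a, b, rfl⟩ := h3 x hx
    have hc : 0 < temp.count [a, b] := List.count_pos_iff.2 hx
    by_cases hab : a = b
    · subst hab
      have h2a := h2 a
      have hodd : es.count (a, a) % 2 = 1 := by omega
      refine ⟨(a, a), List.count_pos_iff.1 (by omega), ?_⟩
      rw [if_pos rfl]
      have hcast : PySem.Int.mod ((es.count (a, a) : Int)) 2 = ((es.count (a, a) % 2 : Nat) : Int) := by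
        exact_mod_cast PySem.Int.mod_natCast (es.count (a, a)) 2
      simp only [beq_iff_eq]
      rw [hcast]
      omega
    · have Hab := h1 a b hab
      have hgt : es.count (b, a) < es.count (a, b) := by omega
      refine ⟨(a, b), List.count_pos_iff.1 (by omega), ?_⟩
      rw [if_neg hab]
      simp only [decide_eq_true_eq]
      intro hq
      have : es.count (a, b) = es.count (b, a) := by exact_mod_cast hq
      omega
  · rintro ⟨⟨a, b⟩, hk, hpred⟩
    have nonempty_of_count : ∀ t : List Int, 0 < temp.count t → 0 < temp.length := by
      intro t ht
      have := List.count_pos_iff.1 ht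
      exact List.length_pos_of_mem this
    by_cases hab : a = b
    · subst hab
      rw [if_pos rfl] at hpred
      have hmod : PySem.Int.mod ((es.count (a, a) : Int)) 2 = 1 := by
        simpa using hpred
      have hcast : PySem.Int.mod ((es.count (a, a) : Int)) 2 = ((es.count (a, a) % 2 : Nat) : Int) := by
        exact_mod_cast PySem.Int.mod_natCast (es.count (a, a)) 2
      rw [hcast] at hmod
      have hodd : es.count (a, a) % 2 = 1 := by omega
      exact nonempty_of_count [a, a] (by rw [h2 a]; omega)
    · rw [if_neg hab] at hpred
      simp only [decide_eq_true_eq] at hpred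
      have hne : es.count (a, b) ≠ es.count (b, a) := by
        intro hq; exact hpred (by exact_mod_cast hq)
      rcases Nat.lt_or_ge (es.count (b, a)) (es.count (a, b)) with hlt | hge
      · exact nonempty_of_count [a, b] (by rw [h1 a b hab]; omega)
      · have : es.count (a, b) < es.count (b, a) := by omega
        exact nonempty_of_count [b, a] (by rw [h1 b a (Ne.symm hab)]; omega)

-- ===== VERDICT (by name: the statement is the Claim_ definition above) =====
theorem is_oriented_spec : Claim_equal_is_oriented := by
  intro arr _
  unfold Spec_is_oriented is_oriented is_oriented_alt
  have hA : (PySem.List.pyRange 0 arr.length 1).foldl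
      (fun temp i => (PySem.List.pyGetD arr i []).foldl (fun temp j => stepA temp i j) temp) ([] : List (List Int))
      = (edgesOf arr).foldl (fun t e => stepA t e.1 e.2) [] := by
    rw [pyfold_enumerate (fun st i el => el.foldl (fun t j => stepA t i j) st) arr []]
    exact foldl_pairs stepA (PySem.List.enumerate arr 0) []
  have hB : (PySem.List.enumerate arr).foldl
      (fun cnt pr => pr.2.foldl
        (fun (cnt : PySem.Dict (Int × Int) Int) j =>
          cnt.insert (pr.1, j) (cnt.getD (pr.1, j) 0 + 1)) cnt) PySem.Dict.empty
      = PySem.Dict.counter (edgesOf arr) := by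
    rw [foldl_pairs (fun (d : PySem.Dict (Int × Int) Int) i j => d.insert (i, j) (d.getD (i, j) 0 + 1))
      (PySem.List.enumerate arr) PySem.Dict.empty]
    rw [← PySem.Dict.foldl_insert_getD_add_one_eq_counter]
    rfl
  simp only [hB, hA]
  have hinv : InvAB (edgesOf arr) ((edgesOf arr).foldl (fun t e => stepA t e.1 e.2) []) := by
    have := fold_inv (edgesOf arr) [] [] ⟨by simp, by simp, by simp⟩
    simpa using this
  exact final_iff _ _ hinv
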